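-- pv_equiv track=rewrite | github.com/aidanq06/Trackify | src/prize2.py | assign_prize
-- ===== SOURCE A (Python) =====
-- def assign_prize(points):
--     # Prizes: each tuple represents (points threshold, prize)
--     prizes = [
--         (0, "N/A"),
--         (1, "Free snack from school store"),
--         (100, 'Free homework pass'),
--         (150, 'Free lunch and free snack'),
--         (200, 'Free entry to next school-related event'),
--         (250, 'Choice of any school-spirited apparel (hoodie, shirt, etc.)'),
--     ]
--     # Assign the highest prize the student's points qualify for
--     for threshold, prize in reversed(prizes):
--         if points >= threshold:
--             return prize
-- ===== SOURCE B (Python) =====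
-- # Ascending threshold table + hand-written bisect_right (binary search), replacing A's reverse linear scan.
-- _THRESHOLDS = [0, 1, 100, 150, 200, 250]
-- _PRIZES = [
--     "N/A",
--     "Free snack from school store",
--     'Free homework pass',
--     'Free lunch and free snack',
--     'Free entry to next school-related event',
--     'Choice of any school-spirited apparel (hoodie, shirt, etc.)',
-- ]
--
-- def assign_prize(points):
--     lo, hi = 0, len(_THRESHOLDS)
--     while lo < hi:
--         mid = (lo + hi) // 2
--         if points < _THRESHOLDS[mid]:
--             hi = mid
--         else:
--             lo = mid + 1
--     if lo == 0:
--         return None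
--     return _PRIZES[lo - 1]
-- ===== Notes on version B (the rewrite author's own statement) =====
-- stated objective: idiomatic
-- what changed: A's reverse linear scan over (threshold, prize) tuples is replaced by a binary search (bisect_right) over an ascending threshold list with a parallel prize list, returning the prize at the computed index.
-- outside the precondition, e.g. on assign_prize(-1): A returns None, B returns None
import Mathlib
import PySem

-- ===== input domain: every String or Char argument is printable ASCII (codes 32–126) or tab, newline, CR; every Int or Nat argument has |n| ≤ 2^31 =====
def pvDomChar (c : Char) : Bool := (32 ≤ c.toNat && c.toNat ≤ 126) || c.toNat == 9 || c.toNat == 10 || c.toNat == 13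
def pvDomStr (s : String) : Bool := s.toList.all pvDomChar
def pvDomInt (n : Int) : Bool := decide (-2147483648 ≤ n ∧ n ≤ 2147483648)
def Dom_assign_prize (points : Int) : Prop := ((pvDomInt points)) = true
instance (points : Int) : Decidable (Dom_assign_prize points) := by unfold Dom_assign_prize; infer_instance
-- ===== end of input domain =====

-- B replaces A's reverse linear scan with a binary search over an ascending threshold table; return value only.

-- ===== PORT A =====
def aPrizes : List (Int × String) :=
  [(0, "N/A"),
   (1, "Free snack from school store"),
   (100, "Free homework pass"),
   (150, "Free lunch and free snack"),
   (200, "Free entry to next school-related event"),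
   (250, "Choice of any school-spirited apparel (hoodie, shirt, etc.)")]

-- the for-loop over reversed(prizes): first tuple with points >= threshold wins; falling off the end is Python's None (excluded by Pre_)
def aLoop (pts : Int) : List (Int × String) → Option String
  | [] => none
  | (t, p) :: rest => if pts ≥ t then some p else aLoop pts rest

def assign_prize (points : Int) : String :=
  (aLoop points aPrizes.reverse).getD ""   -- the none case (points < 0) is outside Pre_

-- ===== PORT B =====
def bThresholds : List Int := [0, 1, 100, 150, 200, 250]
def bPrizes : List String :=
  ["N/A",
   "Free snack from school store",
   "Free homework pass",
   "Free lunch and free snack",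
   "Free entry to next school-related event",
   "Choice of any school-spirited apparel (hoodie, shirt, etc.)"]

-- the while-loop of Source B's hand-written bisect_right
def brGo (x : Int) (lo hi : Nat) : Nat :=
  if h : lo < hi then
    let mid := (lo + hi) / 2
    if x < bThresholds.getD mid 0 then brGo x lo mid else brGo x (mid + 1) hi
  else lo
termination_by hi - lo
decreasing_by all_goals omega

def assign_prize_alt (points : Int) : String :=
  let lo := brGo points 0 6
  if lo = 0 then ""   -- Source B returns None here (points < 0); outside Pre_
  else bPrizes.getD (lo - 1) ""

-- ===== PRECONDITION & SPEC =====
-- Pre_ excludes points < 0, where both A and B fall through and return None, which is not a String.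
def Pre_assign_prize (points : Int) : Prop := 0 ≤ points
instance (points : Int) : Decidable (Pre_assign_prize points) := by unfold Pre_assign_prize; infer_instance
def pvWitness_assign_prize : Int := (120)

def Spec_assign_prize (points : Int) (out : String) : Prop := out = assign_prize_alt points
instance (points : Int) (out : String) : Decidable (Spec_assign_prize points out) := by unfold Spec_assign_prize; infer_instance

-- ===== CLAIM (what is proved, stated in full; the proofs are below) =====
def Claim_equal_assign_prize : Prop := ∀ (points : Int), Dom_assign_prize points → Pre_assign_prize points → Spec_assign_prize points (assign_prize points)

-- ===== LEMMAS AND PROOFS =====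

-- ===== VERDICT (by name: the statement is the Claim_ definition above) =====
theorem assign_prize_spec : Claim_equal_assign_prize := by
  intro points _ hpre
  unfold Spec_assign_prize assign_prize assign_prize_alt
  unfold Pre_assign_prize at hpre
  by_cases h250 : 250 ≤ points
  · simp [aPrizes, aLoop, brGo, bThresholds, bPrizes,
      show ¬ points < 250 by omega, show ¬ points < 150 by omega, show (250:Int) ≤ points by omega]
  · by_cases h200 : 200 ≤ points
    · simp [aPrizes, aLoop, brGo, bThresholds, bPrizes,
        show points < 250 by omega, show ¬ points < 150 by omega,
        show ¬ points < 200 by omega, show ¬ (250:Int) ≤ points by omega, show (200:Int) ≤ points by omega]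
    · by_cases h150 : 150 ≤ points
      · simp [aPrizes, aLoop, brGo, bThresholds, bPrizes,
          show points < 250 by omega, show ¬ points < 150 by omega,
          show points < 200 by omega, show ¬ (250:Int) ≤ points by omega,
          show ¬ (200:Int) ≤ points by omega, show (150:Int) ≤ points by omega]
      · by_cases h100 : 100 ≤ points
        · simp [aPrizes, aLoop, brGo, bThresholds, bPrizes,
            show points < 150 by omega, show ¬ points < 100 by omega,
            show ¬ points < 1 by omega, show ¬ (250:Int) ≤ points by omega,
            show ¬ (200:Int) ≤ points by omega, show ¬ (150:Int) ≤ points by omega, show (100:Int) ≤ points by omega]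
        · by_cases h1 : 1 ≤ points
          · simp [aPrizes, aLoop, brGo, bThresholds, bPrizes,
              show points < 150 by omega, show points < 100 by omega,
              show ¬ points < 1 by omega, show ¬ (250:Int) ≤ points by omega,
              show ¬ (200:Int) ≤ points by omega, show ¬ (150:Int) ≤ points by omega,
              show ¬ (100:Int) ≤ points by omega, show (1:Int) ≤ points by omega]
          · simp [aPrizes, aLoop, brGo, bThresholds, bPrizes,
              show points < 150 by omega, show points < 1 by omega, show ¬ points < 0 by omega,
              show ¬ (250:Int) ≤ points by omega, show ¬ (200:Int) ≤ points by omega,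
              show ¬ (150:Int) ≤ points by omega, show ¬ (100:Int) ≤ points by omega,
              show ¬ (1:Int) ≤ points by omega, show (0:Int) ≤ points by omega]
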